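-- pv_equiv track=rewrite | github.com/DharmikPrajapati23/Compiler_Design | lr0_slr1.py | transitions_to_str
-- ===== SOURCE A (Python) =====
-- from collections import defaultdict, deque
--
-- def transitions_to_str(trans):
--     by_src = defaultdict(list)
--     for (i, X), j in trans.items():
--         by_src[i].append((X, j))
--     lines = ["\nGOTO transitions:"]
--     for i in sorted(by_src.keys()):
--         moves = ", ".join(f"on {X} -> I{j}" for X, j in sorted(by_src[i], key=lambda t: (t[0] != "$", str(t[0]))))
--         lines.append(f"  I{i}: {moves}")
--     return "\n".join(lines)
-- ===== SOURCE B (Python) =====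
-- def transitions_to_str(trans):
--     items = list(trans.items())
--     sources = sorted({i for (i, _X) in trans})
--     lines = ["\nGOTO transitions:"]
--     for i in sources:
--         group = [(X, j) for (s, X), j in items if s == i]
--         group.sort(key=lambda t: (t[0] != "$", t[0]))
--         lines.append("  I%d: %s" % (i, ", ".join("on %s -> I%d" % m for m in group)))
--     return "\n".join(lines)
-- ===== Notes on version B (the rewrite author's own statement) =====
-- stated objective: alternative
-- what changed: Replaces A's defaultdict accumulation pass (group all items into a dict of lists, then sort its keys) by sorting the set of distinct source states once and extracting each state's group with a filter over the items, building the lines with a map instead of a foldl-append.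
import Mathlib
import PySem

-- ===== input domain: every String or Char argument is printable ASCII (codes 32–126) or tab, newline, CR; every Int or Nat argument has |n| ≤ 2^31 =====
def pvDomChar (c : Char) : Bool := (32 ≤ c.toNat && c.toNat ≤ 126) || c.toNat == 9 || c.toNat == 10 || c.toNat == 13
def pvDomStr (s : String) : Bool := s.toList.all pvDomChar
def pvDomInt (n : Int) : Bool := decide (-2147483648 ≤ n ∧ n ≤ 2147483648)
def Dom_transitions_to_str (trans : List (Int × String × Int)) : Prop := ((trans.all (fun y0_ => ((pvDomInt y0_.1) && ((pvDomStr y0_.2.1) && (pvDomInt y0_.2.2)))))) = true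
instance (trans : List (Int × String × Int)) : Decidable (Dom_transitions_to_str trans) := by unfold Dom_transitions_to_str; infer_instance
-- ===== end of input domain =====

-- B groups by sorting the distinct source states and filtering the items per source,
-- instead of A's defaultdict accumulation pass (objective: alternative decomposition, same output).

-- ===== PORT A =====
-- the argument list encodes the Python dict {(i, X): j} in insertion order; both ports
-- first normalise it through PySem.Dict (later duplicate keys overwrite in place)
def transitions_to_str (trans : List (Int × String × Int)) : String :=
  let d : PySem.Dict (Int × String) Int :=
    PySem.Dict.ofList (trans.map (fun t => ((t.1, t.2.1), t.2.2)))
  let by_src : PySem.Dict Int (List (String × Int)) :=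
    d.items.foldl (fun acc p => acc.modify p.1.1 [] (fun l => l ++ [(p.1.2, p.2)])) PySem.Dict.empty
  let lines : List String :=
    (PySem.List.sorted by_src.keys (fun x => x)).foldl
      (fun ls i =>
        let moves := PySem.Str.join ", "
          ((PySem.List.sorted2 (by_src.getD i [])
              (fun t => decide (t.1 ≠ "$")) (fun t => t.1)).map
            (fun t => "on " ++ t.1 ++ " -> I" ++ PySem.Int.toStr t.2))
        ls ++ ["  I" ++ PySem.Int.toStr i ++ ": " ++ moves])
      ["\nGOTO transitions:"]
  PySem.Str.join "\n" lines

-- ===== PORT B =====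
def transitions_to_str_alt (trans : List (Int × String × Int)) : String :=
  let items : List ((Int × String) × Int) :=
    (PySem.Dict.ofList (trans.map (fun t => ((t.1, t.2.1), t.2.2)))).items
  let sources : List Int :=
    PySem.List.sorted (PySem.Set.ofList (items.map (fun p => p.1.1))) (fun x => x)
  let lines : List String :=
    sources.map (fun i =>
      let group := PySem.List.sorted2
        ((items.filter (fun p => p.1.1 == i)).map (fun p => (p.1.2, p.2)))
        (fun t => decide (t.1 ≠ "$")) (fun t => t.1)
      "  I" ++ PySem.Int.toStr i ++ ": " ++
        PySem.Str.join ", " (group.map (fun m => "on " ++ m.1 ++ " -> I" ++ PySem.Int.toStr m.2)))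
  PySem.Str.join "\n" ("\nGOTO transitions:" :: lines)

-- ===== PRECONDITION & SPEC =====
def Spec_transitions_to_str (trans : List (Int × String × Int)) (out : String) : Prop := out = transitions_to_str_alt trans
instance (trans : List (Int × String × Int)) (out : String) : Decidable (Spec_transitions_to_str trans out) := by unfold Spec_transitions_to_str; infer_instance

-- ===== CLAIM (what is proved, stated in full; the proofs are below) =====
def Claim_equal_transitions_to_str : Prop := ∀ (trans : List (Int × String × Int)), Dom_transitions_to_str trans → Spec_transitions_to_str trans (transitions_to_str trans)

-- ===== LEMMAS AND PROOFS =====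

-- appending one formatted line per element is mapping
theorem foldl_append_singleton {α : Type} (l : List α) (f : α → String) (acc : List String) :
    l.foldl (fun ls i => ls ++ [f i]) acc = acc ++ l.map f := by
  induction l generalizing acc with
  | nil => simp
  | cons x xs ih => simp [List.foldl_cons, ih]

-- A's defaultdict group for source i is B's filter of the items
theorem getD_group (items : List ((Int × String) × Int)) (i : Int) :
    (items.foldl (fun acc p => acc.modify p.1.1 [] (fun l => l ++ [(p.1.2, p.2)]))
        (PySem.Dict.empty : PySem.Dict Int (List (String × Int)))).getD i []
      = (items.filter (fun p => p.1.1 == i)).map (fun p => (p.1.2, p.2)) := by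
  have h := PySem.Dict.getD_foldl_modify_append
      (items.map (fun p => (p.1.1, (p.1.2, p.2))))
      (PySem.Dict.empty : PySem.Dict Int (List (String × Int))) i
  rw [List.foldl_map] at h
  simpa [List.filter_map, Function.comp] using h

-- A's defaultdict key list is B's ordered set of sources
theorem keys_group (items : List ((Int × String) × Int)) :
    (items.foldl (fun acc p => acc.modify p.1.1 [] (fun l => l ++ [(p.1.2, p.2)]))
        (PySem.Dict.empty : PySem.Dict Int (List (String × Int)))).keys
      = PySem.Set.ofList (items.map (fun p => p.1.1)) := by
  have h := PySem.Dict.keys_foldl_modify_key items (fun p => p.1.1) []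
      (fun _ p => (fun l => l ++ [(p.1.2, p.2)]))
      (PySem.Dict.empty : PySem.Dict Int (List (String × Int)))
  simpa using h

-- ===== VERDICT (by name: the statement is the Claim_ definition above) =====
theorem transitions_to_str_spec : Claim_equal_transitions_to_str := by
  intro trans _
  show transitions_to_str trans = transitions_to_str_alt trans
  unfold transitions_to_str transitions_to_str_alt
  simp only [keys_group, getD_group, foldl_append_singleton, List.singleton_append]
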